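-- pv_equiv track=rewrite | github.com/buffet/phrofr-tkeubgts | scripts/steno.py | build_stroke
-- ===== SOURCE A (Python) =====
-- def build_stroke(keys):
--     """
--     Transforms an array of keys into a string representing a stroke.
--
--     Example:
--     ['R-', '-R', 'W-', 'S-'] -> "SWR-R"
--     """
--
--     order = [
--         'S-', 'T-', 'K-', 'P-', 'W-', 'H-', 'R-',
--         'A', 'O', '*', 'E', 'U',
--         '-F', '-R', '-P', '-B', '-L', '-G', '-T', '-S', '-D', '-Z',
--     ]
--
--     translate = {key: idx for idx, key in enumerate(order)}
--
--     keys = [translate[key] for key in keys]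
--     keys = list(sorted(set(keys)))
--     keys = [order[key] for key in keys]
--
--     # use " " as seperator if there is none of AO*EU
--     # later this gets replaced with a - when all other - get removed
--     for idx, key in enumerate(keys):
--         if key in 'AO*EU':
--             break
--
--         if key.startswith('-'):
--             keys.insert(idx, ' ')
--             break
--
--     keys = [key.replace("-", "").replace(" ", "-") for key in keys]
--
--     return "".join(keys)
-- ===== SOURCE B (Python) =====
-- def build_stroke(keys):
--     """
--     Transforms an array of keys into a string representing a stroke.
--
--     Example:
--     ['R-', '-R', 'W-', 'S-'] -> "SWR-R"
--     """
--
--     order = [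
--         'S-', 'T-', 'K-', 'P-', 'W-', 'H-', 'R-',
--         'A', 'O', '*', 'E', 'U',
--         '-F', '-R', '-P', '-B', '-L', '-G', '-T', '-S', '-D', '-Z',
--     ]
--
--     present = set(keys)
--     for k in present:
--         if k not in order:
--             raise KeyError(k)
--     left = [k[0] for k in order[:7] if k in present]
--     vowels = [k for k in order[7:12] if k in present]
--     right = [k[1] for k in order[12:] if k in present]
--     sep = ['-'] if right and not vowels else []
--     return "".join(left + vowels + sep + right)
-- ===== Notes on version B (the rewrite author's own statement) =====
-- stated objective: simpler
-- what changed: Instead of translating keys to indices, sorting the deduplicated index set, mapping back and patching in a ' ' separator with an insert-in-loop pass, B makes one pass over the fixed key order, bucketing present keys into left/vowel/right with the hyphens stripped by direct indexing, and joins the buckets with a '-' exactly when right keys exist without vowels.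
import Mathlib
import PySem

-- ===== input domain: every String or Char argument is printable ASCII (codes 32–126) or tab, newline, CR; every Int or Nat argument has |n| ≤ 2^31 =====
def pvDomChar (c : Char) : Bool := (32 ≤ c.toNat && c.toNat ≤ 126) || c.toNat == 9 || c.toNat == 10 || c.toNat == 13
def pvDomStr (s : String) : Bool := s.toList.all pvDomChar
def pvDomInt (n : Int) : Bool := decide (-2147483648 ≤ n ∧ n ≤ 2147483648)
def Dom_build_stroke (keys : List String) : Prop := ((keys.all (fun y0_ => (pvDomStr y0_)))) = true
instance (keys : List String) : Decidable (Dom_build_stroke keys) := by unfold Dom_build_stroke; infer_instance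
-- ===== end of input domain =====

-- B replaces A's translate-sort-map-insert pipeline by one bucketing pass over the fixed key order;
-- equivalence is proved on Pre_ (all keys valid), outside of which A raises KeyError.

-- the fixed steno key order (module data shared by both ports)
def pvOrder : List String :=
  ["S-", "T-", "K-", "P-", "W-", "H-", "R-",
   "A", "O", "*", "E", "U",
   "-F", "-R", "-P", "-B", "-L", "-G", "-T", "-S", "-D", "-Z"]

-- ===== PORT A =====
-- translate = {key: idx for idx, key in enumerate(order)}
def pvTranslate : PySem.Dict String Int :=
  (PySem.List.enumerate pvOrder 0).foldl (fun d p => d.insert p.2 p.1) PySem.Dict.empty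

-- the 'for idx, key in enumerate(keys): … keys.insert(idx, ' '); break' separator pass
def pvSepLoop : List String → List String
  | [] => []
  | k :: rest =>
    if PySem.Str.isIn k "AO*EU" then k :: rest
    else if PySem.Str.startswith k "-" then " " :: k :: rest
    else k :: pvSepLoop rest

def build_stroke (keys : List String) : String :=
  -- keys = [translate[key] for key in keys]  (KeyError excluded by Pre_; getD's default is never used there)
  let keys1 : List Int := keys.map (fun k => PySem.Dict.getD pvTranslate k 0)
  -- keys = list(sorted(set(keys)))
  let keys2 := PySem.List.sorted (PySem.Set.ofList keys1) (fun x => x)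
  -- keys = [order[key] for key in keys]  (indices are valid under Pre_)
  let keys3 := keys2.map (fun i => PySem.List.pyGetD pvOrder i "")
  let keys4 := pvSepLoop keys3
  -- keys = [key.replace("-", "").replace(" ", "-") for key in keys]
  let keys5 := keys4.map (fun k => PySem.Str.replace (PySem.Str.replace k "-" "") " " "-")
  PySem.Str.join "" keys5

-- ===== PORT B =====
def build_stroke_alt (keys : List String) : String :=
  let present := PySem.Set.ofList keys
  -- Source B's validation loop ('raise KeyError' on a key outside order) is a no-op when it does not
  -- raise; raising inputs are outside Pre_build_stroke, so it is omitted here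
  -- left = [k[0] for k in order[:7] if k in present]   (k[0] total on these 2-char literals)
  let left := ((PySem.List.slice pvOrder none (some 7)).filter (fun k => present.contains k)).map
      (fun k => ((PySem.Str.pyGet? k 0).getD ' ').toString)
  let vowels := (PySem.List.slice pvOrder (some 7) (some 12)).filter (fun k => present.contains k)
  -- right = [k[1] for k in order[12:] if k in present]
  let right := ((PySem.List.slice pvOrder (some 12) none).filter (fun k => present.contains k)).map
      (fun k => ((PySem.Str.pyGet? k 1).getD ' ').toString)
  -- sep = ['-'] if right and not vowels else []
  let sep := if right ≠ [] ∧ vowels = [] then ["-"] else []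
  PySem.Str.join "" (left ++ vowels ++ sep ++ right)

-- ===== PRECONDITION & SPEC =====
-- Pre_ admits exactly the inputs on which A returns: A raises KeyError on any key not in the fixed order list.
def Pre_build_stroke (keys : List String) : Prop := ∀ k ∈ keys, k ∈ pvOrder
instance (keys : List String) : Decidable (Pre_build_stroke keys) := by unfold Pre_build_stroke; infer_instance
def pvWitness_build_stroke : List String := ["R-", "-R", "W-", "S-"]

def Spec_build_stroke (keys : List String) (out : String) : Prop := out = build_stroke_alt keys
instance (keys : List String) (out : String) : Decidable (Spec_build_stroke keys out) := by unfold Spec_build_stroke; infer_instance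

-- ===== CLAIM (what is proved, stated in full; the proofs are below) =====
def Claim_equal_build_stroke : Prop := ∀ (keys : List String), Dom_build_stroke keys → Pre_build_stroke keys → Spec_build_stroke keys (build_stroke keys)


-- ===== LEMMAS AND PROOFS =====
-- proof-only data: the three banks of the order list
def pvL : List String := ["S-", "T-", "K-", "P-", "W-", "H-", "R-"]
def pvV : List String := ["A", "O", "*", "E", "U"]
def pvR : List String := ["-F", "-R", "-P", "-B", "-L", "-G", "-T", "-S", "-D", "-Z"]

def pvRep (k : String) : String := PySem.Str.replace (PySem.Str.replace k "-" "") " " "-"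
def pvG (k : String) : Int := ((pvOrder.idxOf k : Nat) : Int)

theorem pvOrder_split : pvOrder = pvL ++ pvV ++ pvR := by decide

theorem pvTrans_eq : ∀ k ∈ pvOrder, PySem.Dict.getD pvTranslate k 0 = pvG k := by decide
theorem pvBack_eq : ∀ k ∈ pvOrder, PySem.List.pyGetD pvOrder (pvG k) "" = k := by decide
theorem pvIdx_inj : ∀ a ∈ pvOrder, ∀ b ∈ pvOrder, pvG a = pvG b → a = b := by decide
theorem pvOrder_nodup : pvOrder.Nodup := by decide
theorem pvOrder_pw : pvOrder.Pairwise (fun a b => pvG a < pvG b) := by decide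
theorem pvL_facts : ∀ k ∈ pvL, PySem.Str.isIn k "AO*EU" = false ∧ PySem.Str.startswith k "-" = false
    ∧ pvRep k = ((PySem.Str.pyGet? k 0).getD ' ').toString := by decide
theorem pvV_facts : ∀ k ∈ pvV, PySem.Str.isIn k "AO*EU" = true ∧ pvRep k = k := by decide
theorem pvR_facts : ∀ k ∈ pvR, PySem.Str.isIn k "AO*EU" = false ∧ PySem.Str.startswith k "-" = true
    ∧ pvRep k = ((PySem.Str.pyGet? k 1).getD ' ').toString := by decide
theorem pvRep_space : pvRep " " = "-" := by decide

theorem pvSepLoop_left (lf rest : List String)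
    (h : ∀ k ∈ lf, PySem.Str.isIn k "AO*EU" = false ∧ PySem.Str.startswith k "-" = false) :
    pvSepLoop (lf ++ rest) = lf ++ pvSepLoop rest := by
  induction lf with
  | nil => simp
  | cons k t ih =>
    have hk := h k (List.mem_cons_self ..)
    simp only [List.cons_append, pvSepLoop, hk.1, hk.2, Bool.false_eq_true, if_false]
    rw [ih (fun x hx => h x (List.mem_cons_of_mem _ hx))]

theorem build_stroke_eq (keys : List String) (hpre : Pre_build_stroke keys) :
    build_stroke keys = build_stroke_alt keys := by
  classical
  set p : String → Bool := fun k => decide (k ∈ keys) with hp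
  -- B's membership test agrees with p
  have hpc : ∀ k, (PySem.Set.ofList keys).contains k = p k := by
    intro k
    simp only [PySem.Set.contains, List.contains_eq_mem, hp, PySem.Set.mem_ofList]
  -- step 1: translate lookups are idxOf
  have h1 : keys.map (fun k => PySem.Dict.getD pvTranslate k 0) = keys.map pvG :=
    List.map_congr_left (fun k hk => pvTrans_eq k (hpre k hk))
  -- step 2: sorted(set(indices)) is the filtered order, mapped to indices
  have hTnodup : ((pvOrder.filter p).map pvG).Nodup :=
    List.Nodup.map_on
      (fun a ha b hb hab => pvIdx_inj a (List.mem_of_mem_filter ha) b (List.mem_of_mem_filter hb) hab)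
      (pvOrder_nodup.filter p)
  have h2 : PySem.List.sorted (PySem.Set.ofList (keys.map pvG)) (fun x => x)
      = (pvOrder.filter p).map pvG := by
    apply PySem.List.sorted_eq_of_perm_of_pairwise_lt
    · refine (List.perm_ext_iff_of_nodup hTnodup (PySem.Set.nodup_ofList _)).mpr ?_
      intro a
      simp only [List.mem_map, List.mem_filter, PySem.Set.mem_ofList, hp, decide_eq_true_eq]
      constructor
      · rintro ⟨k, ⟨_, hk⟩, rfl⟩; exact ⟨k, hk, rfl⟩
      · rintro ⟨k, hk, rfl⟩; exact ⟨k, ⟨hpre k hk, hk⟩, rfl⟩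
    · exact List.pairwise_map.mpr (pvOrder_pw.filter p)
  -- step 3: mapping back through order[·] recovers the filtered order
  have h3 : ((pvOrder.filter p).map pvG).map (fun i => PySem.List.pyGetD pvOrder i "")
      = pvOrder.filter p := by
    rw [List.map_map]
    have := List.map_congr_left
      (f := (fun i => PySem.List.pyGetD pvOrder i "") ∘ pvG) (g := id)
      (l := pvOrder.filter p)
      (fun k hk => pvBack_eq k (List.mem_of_mem_filter hk))
    rw [this, List.map_id]
  -- split into the three banks
  have h4 : pvOrder.filter p = pvL.filter p ++ pvV.filter p ++ pvR.filter p := by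
    rw [pvOrder_split, List.filter_append, List.filter_append]
  have hlf : ∀ k ∈ pvL.filter p, PySem.Str.isIn k "AO*EU" = false ∧ PySem.Str.startswith k "-" = false :=
    fun k hk => ⟨(pvL_facts k (List.mem_of_mem_filter hk)).1, (pvL_facts k (List.mem_of_mem_filter hk)).2.1⟩
  -- the separator pass and the final replace pass, by cases on the vowel/right banks
  have hmapL : (pvL.filter p).map pvRep
      = (pvL.filter p).map (fun k => ((PySem.Str.pyGet? k 0).getD ' ').toString) :=
    List.map_congr_left (fun k hk => (pvL_facts k (List.mem_of_mem_filter hk)).2.2)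
  have hmapV : (pvV.filter p).map pvRep = pvV.filter p := by
    have := List.map_congr_left (f := pvRep) (g := id) (l := pvV.filter p)
      (fun k hk => (pvV_facts k (List.mem_of_mem_filter hk)).2)
    rw [this, List.map_id]
  have hmapR : (pvR.filter p).map pvRep
      = (pvR.filter p).map (fun k => ((PySem.Str.pyGet? k 1).getD ' ').toString) :=
    List.map_congr_left (fun k hk => (pvR_facts k (List.mem_of_mem_filter hk)).2.2)
  have hsep : pvSepLoop (pvV.filter p ++ pvR.filter p)
      = pvV.filter p ++ (if pvR.filter p ≠ [] ∧ pvV.filter p = [] then [" "] else []) ++ pvR.filter p := by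
    rcases hV : pvV.filter p with _ | ⟨v, tv⟩
    · rcases hR : pvR.filter p with _ | ⟨r, tr⟩
      · simp [pvSepLoop]
      · have hr := pvR_facts r (List.mem_of_mem_filter (hR ▸ List.mem_cons_self ..))
        simp only [List.nil_append, pvSepLoop, hr.1, hr.2.1]
        simp
    · have hv := pvV_facts v (List.mem_of_mem_filter (hV ▸ List.mem_cons_self ..))
      simp only [List.cons_append, pvSepLoop, hv.1]
      simp
  have hmapSep : List.map pvRep (if pvR.filter p ≠ [] ∧ pvV.filter p = [] then [" "] else [])
      = (if (pvR.filter p).map (fun k => ((PySem.Str.pyGet? k 1).getD ' ').toString) ≠ [] ∧ pvV.filter p = [] then ["-"] else []) := by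
    by_cases hr0 : pvR.filter p = [] <;> by_cases hv0 : pvV.filter p = [] <;>
      simp [hr0, hv0, pvRep_space, List.map_eq_nil_iff]
  have h5 : (pvSepLoop (pvL.filter p ++ pvV.filter p ++ pvR.filter p)).map pvRep
      = (pvL.filter p).map (fun k => ((PySem.Str.pyGet? k 0).getD ' ').toString)
        ++ pvV.filter p
        ++ (if (pvR.filter p).map (fun k => ((PySem.Str.pyGet? k 1).getD ' ').toString) ≠ [] ∧ pvV.filter p = [] then ["-"] else [])
        ++ (pvR.filter p).map (fun k => ((PySem.Str.pyGet? k 1).getD ' ').toString) := by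
    rw [List.append_assoc, pvSepLoop_left _ _ hlf, hsep]
    simp only [List.map_append, hmapL, hmapV, hmapR, hmapSep, List.append_assoc]
  -- assemble
  have hsl : PySem.List.slice pvOrder none (some 7) = pvL := by decide
  have hsv : PySem.List.slice pvOrder (some 7) (some 12) = pvV := by decide
  have hsr : PySem.List.slice pvOrder (some 12) none = pvR := by decide
  show build_stroke keys = build_stroke_alt keys
  unfold build_stroke build_stroke_alt
  simp only [hsl, hsv, hsr, hpc]
  have h5' : (pvSepLoop (List.filter p pvL ++ List.filter p pvV ++ List.filter p pvR)).map
        (fun k => PySem.Str.replace (PySem.Str.replace k "-" "") " " "-")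
      = (pvL.filter p).map (fun k => ((PySem.Str.pyGet? k 0).getD ' ').toString)
        ++ pvV.filter p
        ++ (if (pvR.filter p).map (fun k => ((PySem.Str.pyGet? k 1).getD ' ').toString) ≠ [] ∧ pvV.filter p = [] then ["-"] else [])
        ++ (pvR.filter p).map (fun k => ((PySem.Str.pyGet? k 1).getD ' ').toString) := h5
  rw [h1, h2, h3, h4, h5']

-- ===== VERDICT (by name: the statement is the Claim_ definition above) =====
theorem build_stroke_spec : Claim_equal_build_stroke := by
  intro keys _ hpre
  exact build_stroke_eq keys hpre
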